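-- pv_equiv track=rewrite | github.com/AbhinavSingh111/HackerRank-DS | print-all-possible-combinations-of-r-elements-in-a-given-array-of-size-n.PY | all_comb
-- ===== SOURCE A (Python) =====
-- def all_comb(arr , n):
--     if n==0:
--         return [[]]
--     l=[]
--     for i in range(len(arr)):
--         first=arr[i]
--         rem=arr[i+1:]
--         comb=all_comb(rem,n-1)
--         for x in comb:
--             l.append([first]+x)
--     return l
-- ===== SOURCE B (Python) =====
-- def all_comb(arr, n):
--     if n == 0:
--         return [[]]
--     if not arr:
--         return []
--     rest = arr[1:]
--     return [[arr[0]] + c for c in all_comb(rest, n - 1)] + all_comb(rest, n)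
-- ===== Notes on version B (the rewrite author's own statement) =====
-- stated objective: simpler
-- what changed: Replaced the for-loop over start positions (one recursive call per index) by an include/exclude binary recursion on the head of the list, which yields the same lexicographic order.
import Mathlib
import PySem

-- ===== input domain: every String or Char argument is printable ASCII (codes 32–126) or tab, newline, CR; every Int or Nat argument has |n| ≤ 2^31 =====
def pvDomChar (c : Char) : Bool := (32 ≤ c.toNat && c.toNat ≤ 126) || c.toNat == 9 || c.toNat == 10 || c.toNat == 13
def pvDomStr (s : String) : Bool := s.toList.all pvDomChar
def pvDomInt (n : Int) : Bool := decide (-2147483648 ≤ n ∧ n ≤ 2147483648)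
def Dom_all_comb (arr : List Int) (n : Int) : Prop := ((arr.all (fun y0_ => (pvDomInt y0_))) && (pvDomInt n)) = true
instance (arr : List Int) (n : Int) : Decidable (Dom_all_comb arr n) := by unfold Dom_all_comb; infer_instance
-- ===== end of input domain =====

-- B replaces A's for-loop over start indices by an include/exclude recursion on the head (simpler).

-- ===== PORT A =====
-- A's for-loop over i in range(len(arr)) with accumulator l; arr[i] is in range so it is
-- List.getElem! (exact), and arr[i+1:] with i+1 ≥ 0 is List.drop (i+1) (exact).
mutual
def all_comb (arr : List Int) (n : Int) : List (List Int) :=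
  if n == 0 then [[]]
  else all_comb_loop arr n 0 []
termination_by (arr.length, 1, 0)

def all_comb_loop (arr : List Int) (n : Int) (i : Nat) (l : List (List Int)) : List (List Int) :=
  if i < arr.length then
    let first := arr[i]!
    let rem := arr.drop (i+1)
    let comb := all_comb rem (n-1)
    all_comb_loop arr n (i+1) (l ++ comb.map (fun x => first :: x))
  else l
termination_by (arr.length, 0, arr.length - i)
decreasing_by
  · have : arr.length - (i+1) < arr.length := by omega
    simp [Prod.lex_def, List.length_drop]; omega
  · simp [Prod.lex_def]; omega
end

-- ===== PORT B =====
def all_comb_alt (arr : List Int) (n : Int) : List (List Int) :=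
  if n == 0 then [[]]
  else
    match arr with
    | [] => []
    | x :: rest => (all_comb_alt rest (n-1)).map (fun c => x :: c) ++ all_comb_alt rest n
termination_by arr.length

-- ===== PRECONDITION & SPEC =====
def Spec_all_comb (arr : List Int) (n : Int) (out : List (List Int)) : Prop := out = all_comb_alt arr n
instance (arr : List Int) (n : Int) (out : List (List Int)) : Decidable (Spec_all_comb arr n out) := by unfold Spec_all_comb; infer_instance

-- ===== CLAIM (what is proved, stated in full; the proofs are below) =====
def Claim_equal_all_comb : Prop := ∀ (arr : List Int) (n : Int), Dom_all_comb arr n → Spec_all_comb arr n (all_comb arr n)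

-- ===== LEMMAS AND PROOFS =====

-- B's recursion with the n == 0 test stripped off (what B computes when n ≠ 0).
def altLoop : List Int → Int → List (List Int)
  | [], _ => []
  | x :: rest, n => (all_comb_alt rest (n-1)).map (fun c => x :: c) ++ altLoop rest n

theorem alt_ne_zero (arr : List Int) (n : Int) (hn : n ≠ 0) :
    all_comb_alt arr n = altLoop arr n := by
  induction arr with
  | nil => simp [all_comb_alt, altLoop, hn]
  | cons x rest ih =>
    rw [all_comb_alt, altLoop, ih]
    simp [hn]

theorem loop_spec (arr : List Int) (n : Int)
    (ih : ∀ arr' : List Int, arr'.length < arr.length → ∀ m : Int,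
      all_comb arr' m = all_comb_alt arr' m) :
    ∀ k i l, i + k = arr.length →
      all_comb_loop arr n i l = l ++ altLoop (arr.drop i) n := by
  intro k
  induction k with
  | zero =>
    intro i l hi
    rw [all_comb_loop]
    have : ¬ i < arr.length := by omega
    simp [this, List.drop_of_length_le (by omega : arr.length ≤ i), altLoop]
  | succ k ihk =>
    intro i l hi
    have hlt : i < arr.length := by omega
    rw [all_comb_loop]
    simp only [hlt, if_pos]
    rw [ihk (i+1) _ (by omega)]
    have hrec : all_comb (arr.drop (i+1)) (n-1) = all_comb_alt (arr.drop (i+1)) (n-1) :=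
      ih _ (by simp [List.length_drop]; omega) _
    have hdrop : arr.drop i = arr[i] :: arr.drop (i+1) := (List.getElem_cons_drop hlt).symm
    rw [hdrop, altLoop, hrec]
    have : arr[i]! = arr[i] := getElem!_pos arr i hlt
    simp [this, List.append_assoc]

theorem main_eq (arr : List Int) (n : Int) : all_comb arr n = all_comb_alt arr n := by
  by_cases hn : n = 0
  · subst hn; rw [all_comb, all_comb_alt.eq_def]; simp
  · rw [all_comb]
    simp only [beq_iff_eq, hn, if_false]
    rw [loop_spec arr n (fun a' h m => main_eq a' m) arr.length 0 [] (by omega)]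
    simp [alt_ne_zero arr n hn]
termination_by arr.length
decreasing_by exact h

-- ===== VERDICT (by name: the statement is the Claim_ definition above) =====
theorem all_comb_spec : Claim_equal_all_comb := by
  intro arr n _
  unfold Spec_all_comb
  exact main_eq arr n
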